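-- pv_equiv track=rewrite | github.com/hinst/PreciousStones | main.py | getLongestSequenceLength
-- ===== SOURCE A (Python) =====
-- def getLongestSequenceLength(text):
--     longestSequenceLength = 0
--     currentSequenceLength = 0
--     lastCharacter = ' '
--     textLength = len(text)
--     for i in range(textLength * 2):
--         character = text[i % textLength]
--         if character != lastCharacter:
--             currentSequenceLength = 0
--         currentSequenceLength += 1
--         if longestSequenceLength < currentSequenceLength:
--             longestSequenceLength = currentSequenceLength
--         lastCharacter = character
--     return longestSequenceLength
-- ===== SOURCE B (Python) =====
-- def getLongestSequenceLength(text):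
--     # Staged computation: collect the boundary positions where the doubled
--     # string changes character, then the answer is the largest gap between
--     # consecutive boundaries.  No run counters, no scanning loop.
--     if not text:
--         return 0
--     s = text * 2
--     bounds = [0] + [i for i, (a, b) in enumerate(zip(s, s[1:]), 1) if a != b] + [len(s)]
--     return max(b - a for a, b in zip(bounds, bounds[1:]))
-- ===== Notes on version B (the rewrite author's own statement) =====
-- stated objective: alternative
-- what changed: Replaces A's single-pass counter loop with a staged computation: build the list of boundary positions where the doubled string changes character (enumerate+zip filter), append the endpoints, and return the maximum difference of consecutive boundaries.
import Mathlib
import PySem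

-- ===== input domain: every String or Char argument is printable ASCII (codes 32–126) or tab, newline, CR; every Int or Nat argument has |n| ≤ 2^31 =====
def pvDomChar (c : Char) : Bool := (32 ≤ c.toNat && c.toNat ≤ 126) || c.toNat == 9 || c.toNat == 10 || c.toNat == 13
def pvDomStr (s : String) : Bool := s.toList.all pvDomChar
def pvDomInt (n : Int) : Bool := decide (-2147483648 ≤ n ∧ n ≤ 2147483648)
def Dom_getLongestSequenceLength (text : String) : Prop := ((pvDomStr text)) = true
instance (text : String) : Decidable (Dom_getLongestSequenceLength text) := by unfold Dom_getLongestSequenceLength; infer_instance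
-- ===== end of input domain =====

-- B replaces A's single-pass counter loop by a staged computation: a list of
-- boundary positions where the doubled string changes character, then the
-- maximum gap between consecutive boundaries (objective: alternative).

-- ===== PORT A =====
def getLongestSequenceLength (text : String) : Int :=
  let textLength : Int := PySem.Str.len text
  ((PySem.List.pyRange 0 (textLength * 2) 1).foldl
    (fun (st : Int × Int × Char) i =>
      -- character = text[i % textLength]; in range on every loop iteration,
      -- so the .getD ' ' default is never taken
      let character := (PySem.Str.pyGet? text (PySem.Int.mod i textLength)).getD ' '
      let currentSequenceLength := (if character ≠ st.2.2 then 0 else st.2.1) + 1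
      let longestSequenceLength :=
        if st.1 < currentSequenceLength then currentSequenceLength else st.1
      (longestSequenceLength, currentSequenceLength, character))
    (0, 0, ' ')).1

-- ===== PORT B =====
def getLongestSequenceLength_alt (text : String) : Int :=
  if text.toList = [] then 0
  else
    let s : List Char := text.toList ++ text.toList        -- s = text * 2
    -- bounds = [0] + [i for i, (a, b) in enumerate(zip(s, s[1:]), 1) if a != b] + [len(s)]
    let bounds : List Int :=
      [0] ++ ((PySem.List.enumerate (s.zip (s.drop 1)) 1).filter
                (fun p => p.2.1 ≠ p.2.2)).map (fun p => p.1)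
          ++ [(s.length : Int)]
    -- max(b - a for a, b in zip(bounds, bounds[1:])); bounds has ≥ 2 elements,
    -- so the generator is nonempty and the .getD 0 default is never taken
    (PySem.List.max? ((bounds.zip (bounds.drop 1)).map (fun q => q.2 - q.1))
      (fun x => x)).getD 0

-- ===== PRECONDITION & SPEC =====
def Spec_getLongestSequenceLength (text : String) (out : Int) : Prop := out = getLongestSequenceLength_alt text
instance (text : String) (out : Int) : Decidable (Spec_getLongestSequenceLength text out) := by unfold Spec_getLongestSequenceLength; infer_instance

-- ===== CLAIM (what is proved, stated in full; the proofs are below) =====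
def Claim_equal_getLongestSequenceLength : Prop := ∀ (text : String), Dom_getLongestSequenceLength text → Spec_getLongestSequenceLength text (getLongestSequenceLength text)

-- ===== LEMMAS AND PROOFS =====

-- A's loop body as a step function on (longest, current, last)
def pvStepA (st : Int × Int × Char) (character : Char) : Int × Int × Char :=
  let currentSequenceLength := (if character ≠ st.2.2 then 0 else st.2.1) + 1
  let longestSequenceLength :=
    if st.1 < currentSequenceLength then currentSequenceLength else st.1
  (longestSequenceLength, currentSequenceLength, character)

-- the longest run over the suffix, starting inside a run of c of current length C
def pvG (C : Int) (c : Char) : List Char → Int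
  | [] => C
  | x :: t => if x = c then pvG (C + 1) c t else max C (pvG 1 x t)

-- change-boundary positions of a list, first candidate position i
def pvIdxs : List Char → Int → List Int
  | [], _ => []
  | [_], _ => []
  | a :: b :: t, i => (if a ≠ b then [i] else []) ++ pvIdxs (b :: t) (i + 1)

-- max over consecutive differences of (p :: bs ++ [final])
def pvMaxDiffs : Int → List Int → Int → Int
  | p, [], final => final - p
  | p, b :: bs, final => max (b - p) (pvMaxDiffs b bs final)

theorem pvG_ge (s : List Char) : ∀ (C : Int) (c : Char), C ≤ pvG C c s := by
  induction s with
  | nil => intro C c; simp [pvG]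
  | cons x t ih =>
      intro C c
      simp only [pvG]
      split
      · exact le_trans (by omega) (ih (C + 1) c)
      · exact le_max_left _ _

theorem pvFoldA_eq (s : List Char) :
    ∀ (L C : Int) (c : Char), 0 ≤ C → C ≤ L →
      (s.foldl pvStepA (L, C, c)).1 = max L (pvG C c s) := by
  induction s with
  | nil => intro L C c _ hCL; simp [pvG]; omega
  | cons x t ih =>
      intro L C c hC hCL
      rw [List.foldl_cons]
      simp only [pvStepA]
      by_cases hx : x = c
      · subst hx
        have hcond : (if x ≠ x then (0 : Int) else C) = C := by simp
        rw [hcond, ih _ (C + 1) x (by omega) (by split <;> omega)]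
        have h1 := pvG_ge t (C + 1) x
        simp only [pvG, if_true]
        split <;> omega
      · have hcond : (if x ≠ c then (0 : Int) else C) = 0 := by simp [hx]
        rw [hcond, ih _ (0 + 1) x (by omega) (by split <;> omega)]
        have h1 := pvG_ge t 1 x
        simp only [pvG, if_neg hx]
        norm_num
        split <;> omega

-- the enumerate/zip/filter/map pipeline of B computes exactly pvIdxs
theorem pvPipeline_eq (s : List Char) : ∀ (i : Int),
    ((PySem.List.enumerate (s.zip (s.drop 1)) i).filter
        (fun p => p.2.1 ≠ p.2.2)).map (fun p => p.1) = pvIdxs s i := by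
  induction s with
  | nil => intro i; simp [pvIdxs]
  | cons a t ih =>
      intro i
      cases t with
      | nil => simp [pvIdxs]
      | cons b t' =>
          simp only [List.drop_succ_cons, List.drop_zero, List.zip_cons_cons,
            PySem.List.enumerate_cons, List.filter_cons]
          by_cases hab : a = b
          · simp only [pvIdxs, hab]
            simp only [ne_eq, not_true_eq_false, decide_false]
            rw [if_neg (by simp)]
            simpa using ih (i + 1)
          · simp only [pvIdxs, if_pos (by exact hab)]
            rw [if_pos (by simp [hab])]
            simpa using ih (i + 1)

-- diffs of the bounds list as a recursive function
def pvDiffs : Int → List Int → Int → List Int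
  | p, [], final => [final - p]
  | p, b :: bs, final => (b - p) :: pvDiffs b bs final

theorem pvDiffs_eq (bs : List Int) : ∀ (p final : Int),
    ((p :: bs ++ [final]).zip ((p :: bs ++ [final]).drop 1)).map
        (fun q => q.2 - q.1) = pvDiffs p bs final := by
  induction bs with
  | nil => intro p final; simp [pvDiffs]
  | cons b bs' ih =>
      intro p final
      have hzip : (p :: (b :: bs') ++ [final]).zip ((p :: (b :: bs') ++ [final]).drop 1)
          = (p, b) :: ((b :: bs' ++ [final]).zip ((b :: bs' ++ [final]).drop 1)) := by
        simp
      rw [hzip, List.map_cons, ih]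
      rfl

theorem pvFoldDiffs (bs : List Int) : ∀ (p final a : Int),
    List.foldl max a (pvDiffs p bs final) = max a (pvMaxDiffs p bs final) := by
  induction bs with
  | nil => intro p final a; simp [pvDiffs, pvMaxDiffs]
  | cons b bs' ih =>
      intro p final a
      simp only [pvDiffs, pvMaxDiffs, List.foldl_cons]
      rw [ih, ← max_assoc]

theorem pvMax_eq (bs : List Int) (p final : Int) :
    (PySem.List.max? (((p :: bs ++ [final]).zip ((p :: bs ++ [final]).drop 1)).map
        (fun q => q.2 - q.1)) (fun x => x)).getD 0
      = pvMaxDiffs p bs final := by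
  rw [pvDiffs_eq]
  cases bs with
  | nil => simp [pvDiffs, pvMaxDiffs, PySem.List.max?]
  | cons b bs' =>
      simp only [pvDiffs, PySem.List.max?_id_cons, Option.getD_some, pvMaxDiffs]
      rw [pvFoldDiffs]

-- main connection: B's staged result equals pvG, run started just before position p+C
theorem pvMaxDiffs_eq_G (t : List Char) : ∀ (a : Char) (p C : Int),
    pvMaxDiffs p (pvIdxs (a :: t) (p + C)) (p + C + t.length) = pvG C a t := by
  induction t with
  | nil => intro a p C; simp [pvIdxs, pvMaxDiffs, pvG]
  | cons x t' ih =>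
      intro a p C
      simp only [pvIdxs, pvG, List.length_cons]
      push_cast
      by_cases hx : a = x
      · rw [if_neg (by simp [hx]), if_pos hx.symm, List.nil_append,
            show p + C + ((t'.length : Int) + 1) = p + (C + 1) + t'.length by ring,
            show p + C + 1 = p + (C + 1) by ring, hx]
        exact ih x p (C + 1)
      · rw [if_pos hx, if_neg (fun h => hx h.symm), List.singleton_append]
        simp only [pvMaxDiffs]
        rw [show p + C + ((t'.length : Int) + 1) = (p + C) + 1 + t'.length by ring,
            show p + C + 1 = (p + C) + 1 by ring,
            ih x (p + C) 1]
        congr 1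
        omega

theorem pvMapA (text : String) :
    (PySem.List.pyRange 0 (PySem.Str.len text * 2) 1).map
      (fun i => (PySem.Str.pyGet? text (PySem.Int.mod i (PySem.Str.len text))).getD ' ')
    = text.toList ++ text.toList := by
  have hlen : PySem.Str.len text = (text.toList.length : Int) := by simp
  rw [hlen, PySem.List.pyRange_one, List.map_map]
  apply List.ext_getElem
  · simp; omega
  · intro k h1 h2
    simp only [List.getElem_map, List.getElem_range, Function.comp_apply, zero_add]
    have hn : 0 < text.toList.length := by
      simp only [List.length_map, List.length_range] at h1
      omega
    have hk2 : k < 2 * text.toList.length := by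
      simp only [List.length_map, List.length_range] at h1
      omega
    have hmod : PySem.Int.mod (k : Int) (text.toList.length : Int)
        = ((k % text.toList.length : Nat) : Int) := by
      exact PySem.Int.mod_natCast k text.toList.length
    rw [hmod]
    have hlt : k % text.toList.length < text.toList.length := Nat.mod_lt _ hn
    simp only [PySem.Str.pyGet?_natCast]
    rw [List.getElem?_eq_getElem hlt]
    simp only [Option.getD_some]
    by_cases hk : k < text.toList.length
    · have hmk : k % text.toList.length = k := Nat.mod_eq_of_lt hk
      simp only [hmk, List.getElem_append_left hk]
    · have hge : text.toList.length ≤ k := by omega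
      have hmk : k % text.toList.length = k - text.toList.length := by
        rw [Nat.mod_eq_sub_mod hge, Nat.mod_eq_of_lt (by omega)]
      simp only [hmk, List.getElem_append_right hge]

theorem pvA_eq_fold (text : String) :
    getLongestSequenceLength text
      = ((text.toList ++ text.toList).foldl pvStepA (0, 0, ' ')).1 := by
  show ((PySem.List.pyRange 0 (PySem.Str.len text * 2) 1).foldl
      (fun st i => pvStepA st
        ((PySem.Str.pyGet? text (PySem.Int.mod i (PySem.Str.len text))).getD ' '))
      (0, 0, ' ')).1 = _
  rw [← List.foldl_map, pvMapA]

-- ===== VERDICT (by name: the statement is the Claim_ definition above) =====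
theorem getLongestSequenceLength_spec : Claim_equal_getLongestSequenceLength := by
  intro text _
  show getLongestSequenceLength text = getLongestSequenceLength_alt text
  by_cases hnil : text.toList = []
  · rw [pvA_eq_fold, hnil]
    simp [getLongestSequenceLength_alt, hnil]
  · obtain ⟨h, t, hs⟩ : ∃ h t, text.toList ++ text.toList = h :: t := by
      cases hcl : text.toList with
      | nil => exact absurd hcl hnil
      | cons h rest => exact ⟨h, rest ++ text.toList, by rw [hcl]; rfl⟩
    rw [pvA_eq_fold, pvFoldA_eq _ 0 0 ' ' le_rfl le_rfl]
    unfold getLongestSequenceLength_alt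
    rw [if_neg hnil]
    simp only [hs]
    rw [pvPipeline_eq]
    have hmax := pvMax_eq (pvIdxs (h :: t) 1) 0 ((h :: t).length : Int)
    simp only [List.cons_append, List.nil_append] at hmax ⊢
    rw [hmax]
    have hMD := pvMaxDiffs_eq_G t h 0 1
    norm_num at hMD
    rw [show (((h :: t).length : Nat) : Int) = 1 + (t.length : Int) by
          simp [List.length_cons]; ring,
        hMD]
    have h1 := pvG_ge t 1 h
    simp only [pvG]
    by_cases hh : h = ' '
    · rw [if_pos hh, hh, show (0:Int)+1 = 1 by ring]
      have := pvG_ge t 1 ' '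
      omega
    · rw [if_neg hh]
      omega
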